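-- pv_equiv track=rewrite | github.com/lhxxl85/Xcel-HeatPump | src/hp_controller/master/client.py | _extract_registers_from_response
-- ===== SOURCE A (Python) =====
-- from typing import Dict, Iterable, Mapping, Optional, TYPE_CHECKING
--
-- def _extract_registers_from_response(
--
--     start_address: int,
--     values: Iterable[int],
--     register_map: Mapping[int, str],
-- ) -> Dict[str, int]:
--     """
--     将连续读取的寄存器列表按真实地址映射到字段名
--     """
--     registers: Dict[str, int] = {}
--     for offset, value in enumerate(values or []):
--         address = start_address + offset
--         name = register_map.get(address)
--         if name:
--             registers[name] = value
--     return registers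
-- ===== SOURCE B (Python) =====
-- def _extract_registers_from_response(start_address, values, register_map):
--     vals = list(values or [])
--     pairs = [
--         (register_map[a], vals[a - start_address])
--         for a in sorted(register_map)
--         if 0 <= a - start_address < len(vals) and register_map[a]
--     ]
--     return dict(pairs)
-- ===== Notes on version B (the rewrite author's own statement) =====
-- stated objective: alternative
-- what changed: B builds a list of (name, value) pairs with a comprehension over the register map's addresses in ascending sorted order and converts it with dict(pairs), instead of A's mutating loop over enumerate(values) with a per-value dict lookup; ascending order reproduces A's insertion/overwrite order exactly.
import Mathlib
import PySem

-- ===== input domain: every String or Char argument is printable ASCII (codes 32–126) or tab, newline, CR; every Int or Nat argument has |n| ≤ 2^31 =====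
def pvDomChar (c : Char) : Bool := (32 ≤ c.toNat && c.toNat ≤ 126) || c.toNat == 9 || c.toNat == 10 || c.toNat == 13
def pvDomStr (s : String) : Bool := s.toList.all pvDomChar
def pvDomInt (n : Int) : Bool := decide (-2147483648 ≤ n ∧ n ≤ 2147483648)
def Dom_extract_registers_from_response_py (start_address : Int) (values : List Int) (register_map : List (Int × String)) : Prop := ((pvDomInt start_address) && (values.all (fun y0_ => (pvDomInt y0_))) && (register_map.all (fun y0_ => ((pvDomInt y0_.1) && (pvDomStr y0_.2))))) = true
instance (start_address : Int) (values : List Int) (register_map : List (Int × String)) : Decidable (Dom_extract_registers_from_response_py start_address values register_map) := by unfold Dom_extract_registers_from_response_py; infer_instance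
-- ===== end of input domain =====

-- B builds a pair list by a comprehension over the map's addresses in ascending sorted order and
-- converts it with dict(pairs), instead of A's mutating loop over enumerate(values) with a per-value
-- dict lookup (objective: alternative decomposition, same result).


-- ===== PORT A =====
-- 'for offset, value in enumerate(values or [])': register_map.get(address) → Dict.get?; falsy name (None/"") skips.
def extract_registers_from_response_py (start_address : Int) (values : List Int) (register_map : List (Int × String)) : List (String × Int) :=
  let d := PySem.Dict.ofList register_map
  let vs := if values.isEmpty then ([] : List Int) else values   -- 'values or []'
  ((PySem.List.enumerate vs).foldl (fun r ov =>
      match d.get? (start_address + ov.1) with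
      | some name => if name ≠ "" then r.insert name ov.2 else r
      | none => r) PySem.Dict.empty).items

-- ===== PORT B =====
-- comprehension over 'sorted(register_map)': register_map[a] cannot fail (a is a key) and, under the
-- '0 <= off < len(vals)' guard, neither can vals[a - start_address] — the getD defaults are unreachable.
def extract_registers_from_response_py_alt (start_address : Int) (values : List Int) (register_map : List (Int × String)) : List (String × Int) :=
  let vals := if values.isEmpty then ([] : List Int) else values   -- list(values or [])
  let d := PySem.Dict.ofList register_map
  let pairs := (PySem.List.sorted d.keys (fun a => a) false).filterMap (fun a =>
      if (0 ≤ a - start_address ∧ a - start_address < (vals.length : Int)) ∧ (d.get? a).getD "" ≠ "" then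
        some ((d.get? a).getD "", (PySem.List.pyGet? vals (a - start_address)).getD 0)
      else none)
  (PySem.Dict.ofList pairs).items   -- dict(pairs)

-- ===== PRECONDITION & SPEC =====
def Spec_extract_registers_from_response_py (start_address : Int) (values : List Int) (register_map : List (Int × String)) (out : List (String × Int)) : Prop := out = extract_registers_from_response_py_alt start_address values register_map
instance (start_address : Int) (values : List Int) (register_map : List (Int × String)) (out : List (String × Int)) : Decidable (Spec_extract_registers_from_response_py start_address values register_map out) := by unfold Spec_extract_registers_from_response_py; infer_instance

-- ===== CLAIM (what is proved, stated in full; the proofs are below) =====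
def Claim_equal_extract_registers_from_response_py : Prop := ∀ (start_address : Int) (values : List Int) (register_map : List (Int × String)), Dom_extract_registers_from_response_py start_address values register_map → Spec_extract_registers_from_response_py start_address values register_map (extract_registers_from_response_py start_address values register_map)

-- ===== LEMMAS AND PROOFS =====

-- the common "emit (name, value) or skip" content of one step, as a partial function on the address
def pvF (start_address : Int) (values : List Int) (d : PySem.Dict Int String) (a : Int) : Option (String × Int) :=
  if 0 ≤ a - start_address ∧ a - start_address < (values.length : Int) then
    match d.get? a with
    | some name =>
      if name ≠ "" then
        match PySem.List.pyGet? values (a - start_address) with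
        | some v => some (name, v)
        | none => none
      else none
    | none => none
  else none

-- an insert-or-skip fold is the plain insert fold over the emitted pairs
theorem pv_foldl_filterMap {α : Type} (f : α → Option (String × Int)) (l : List α) (r : PySem.Dict String Int) :
    l.foldl (fun r x => match f x with | some p => r.insert p.1 p.2 | none => r) r
      = (l.filterMap f).foldl (fun r p => r.insert p.1 p.2) r := by
  induction l generalizing r with
  | nil => rfl
  | cons x t ih =>
    simp only [List.foldl_cons, List.filterMap_cons]
    cases f x <;> simp [ih]

theorem pv_enumerate_eq (xs : List Int) (s : Int) :
    PySem.List.enumerate xs s = (List.range xs.length).map (fun (i : ℕ) => (s + (i : Int), xs.getD i 0)) := by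
  induction xs generalizing s with
  | nil => rfl
  | cons x t ih =>
    simp only [PySem.List.enumerate, List.length_cons, List.range_succ_eq_map, List.map_cons,
      List.map_map, ih]
    refine List.cons_eq_cons.mpr ⟨by simp, ?_⟩
    apply List.map_congr_left
    intro i _
    simp only [Function.comp, Nat.succ_eq_add_one]
    refine Prod.ext ?_ (by rfl)
    push_cast
    ring

theorem pv_filterMap_filter {α : Type} (f : α → Option (String × Int)) (p : α → Bool) (l : List α)
    (h : ∀ a, p a = false → f a = none) :
    l.filterMap f = (l.filter p).filterMap f := by
  induction l with
  | nil => rfl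
  | cons x t ih =>
    by_cases hp : p x = true
    · simp [hp, List.filterMap_cons, ih]
    · have : p x = false := by revert hp; cases p x <;> simp
      simp [this, h x this, ih]

-- B's comprehension body emits exactly pvF
theorem pv_comp_eq_pvF (start_address : Int) (values : List Int) (d : PySem.Dict Int String) (a : Int) :
    (if (0 ≤ a - start_address ∧ a - start_address < (values.length : Int)) ∧ (d.get? a).getD "" ≠ "" then
        some ((d.get? a).getD "", (PySem.List.pyGet? values (a - start_address)).getD 0)
      else none)
      = pvF start_address values d a := by
  simp only [pvF]
  by_cases hc : 0 ≤ a - start_address ∧ a - start_address < (values.length : Int)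
  · rw [if_pos hc]
    have hnat : a - start_address = ((a - start_address).toNat : Int) := by omega
    have hlt : (a - start_address).toNat < values.length := by omega
    have hv : PySem.List.pyGet? values (a - start_address)
        = some (values.getD (a - start_address).toNat 0) := by
      conv_lhs => rw [hnat]
      rw [PySem.List.pyGet?_natCast, List.getElem?_eq_getElem hlt, List.getD_eq_getElem _ _ hlt]
    rcases d.get? a with _ | name
    · simp
    · by_cases hn : name = ""
      · simp [hn]
      · simp only [Option.getD_some]
        rw [if_pos ⟨hc, hn⟩, hv]
        simp [hn]
  · rw [if_neg hc, if_neg (by tauto)]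

-- the two traversal orders visit the same in-range mapped addresses in the same (ascending) order
theorem pv_keys_eq (start_address : Int) (n : ℕ) (d : PySem.Dict Int String) (hkn : d.keys.Nodup) :
    (PySem.List.sorted d.keys (fun a => a) false).filter
        (fun a => decide (0 ≤ a - start_address ∧ a - start_address < (n : Int)))
      = ((List.range n).map (fun (i : ℕ) => start_address + (i : Int))).filter (fun a => d.contains a) := by
  have hperm : (PySem.List.sorted d.keys (fun a => a) false).Perm d.keys :=
    PySem.List.sorted_perm d.keys (fun a => a) false
  have hle : (PySem.List.sorted d.keys (fun a => a) false).Pairwise (fun a b => a ≤ b) :=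
    PySem.List.sorted_pairwise d.keys (fun a => a)
  have hnd : (PySem.List.sorted d.keys (fun a => a) false).Nodup := hperm.nodup_iff.mpr hkn
  have hltL : (PySem.List.sorted d.keys (fun a => a) false).Pairwise (fun a b => a < b) :=
    (hle.and hnd).imp (fun h => lt_of_le_of_ne h.1 h.2)
  have hpwL := hltL.filter (fun a => decide (0 ≤ a - start_address ∧ a - start_address < (n : Int)))
  have hltR : (((List.range n).map (fun (i : ℕ) => start_address + (i : Int)))).Pairwise (fun a b => a < b) := by
    rw [List.pairwise_map]
    exact List.pairwise_lt_range.imp (fun h => by omega)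
  have hpwR := hltR.filter (fun a => d.contains a)
  refine List.Perm.eq_of_pairwise (le := fun a b => (a : Int) < b) (fun a b _ _ h1 h2 => absurd h1 (by omega)) hpwL hpwR ?_
  rw [List.perm_ext_iff_of_nodup (hpwL.imp (fun h => ne_of_lt h)) (hpwR.imp (fun h => ne_of_lt h))]
  intro a
  simp only [List.mem_filter, PySem.List.mem_sorted, List.mem_map, List.mem_range,
    decide_eq_true_eq, PySem.Dict.contains_iff_mem_keys]
  constructor
  · rintro ⟨hk, h0, hn⟩
    exact ⟨⟨(a - start_address).toNat, by omega, by omega⟩, hk⟩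
  · rintro ⟨⟨i, hi, rfl⟩, hk⟩
    exact ⟨hk, by omega, by omega⟩

-- ===== VERDICT (by name: the statement is the Claim_ definition above) =====
theorem extract_registers_from_response_py_spec : Claim_equal_extract_registers_from_response_py := by
  intro start_address values register_map _
  unfold Spec_extract_registers_from_response_py
  unfold extract_registers_from_response_py extract_registers_from_response_py_alt
  have hvs : (if values.isEmpty then ([] : List Int) else values) = values := by
    cases values <;> simp
  simp only [hvs]
  set d := PySem.Dict.ofList register_map with hd
  -- B: dict(pairs) is the insert fold over the emitted pairs (ofList is that fold definitionally)
  show _ = ((((PySem.List.sorted d.keys (fun a => a) false).filterMap _).foldl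
      (fun r (p : String × Int) => r.insert p.1 p.2) PySem.Dict.empty)).items
  congr 1
  -- rewrite A's loop body into emit-or-skip form
  have hA : (fun (r : PySem.Dict String Int) (ov : Int × Int) =>
        match d.get? (start_address + ov.1) with
        | some name => if name ≠ "" then r.insert name ov.2 else r
        | none => r)
      = (fun r ov => match (fun (ov : Int × Int) =>
          match d.get? (start_address + ov.1) with
          | some name => if name ≠ "" then some (name, ov.2) else none
          | none => none) ov with
        | some p => r.insert p.1 p.2
        | none => r) := by
    funext r ov
    rcases hg : d.get? (start_address + ov.1) with _ | name
    · simp [hg]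
    · by_cases hn : name ≠ "" <;> simp [hg, hn]
  rw [hA, pv_foldl_filterMap]
  congr 1
  -- B's emitted list is the pvF one
  rw [List.filterMap_congr (fun a _ => pv_comp_eq_pvF start_address values d a)]
  -- A's emitted list over enumerate = filterMap pvF over the ascending in-range addresses
  rw [pv_enumerate_eq values 0, List.filterMap_map,
      pv_filterMap_filter (pvF start_address values d)
        (fun a => decide (0 ≤ a - start_address ∧ a - start_address < ((values.length : ℕ) : Int)))
        _ (by
          intro a ha
          simp only [decide_eq_false_iff_not] at ha
          simp only [pvF]
          rw [if_neg ha]),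
      pv_keys_eq start_address values.length d (PySem.Dict.nodup_keys_ofList register_map),
      ← pv_filterMap_filter (pvF start_address values d) (fun a => d.contains a) _ (by
          intro a ha
          have : d.get? a = none := (PySem.Dict.get?_eq_none_iff_contains d a).mpr ha
          simp [pvF, this]),
      List.filterMap_map]
  apply List.filterMap_congr
  intro i hi
  rw [List.mem_range] at hi
  simp only [Function.comp]
  have h1 : (0 : Int) + (i : Int) = (i : Int) := by ring
  have h2 : start_address + (i : Int) - start_address = (i : Int) := by ring
  simp only [pvF, h1, h2]
  have hc : (0 : Int) ≤ (i : Int) ∧ (i : Int) < (values.length : Int) := by omega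
  rw [if_pos hc]
  rcases d.get? (start_address + (i : Int)) with _ | name
  · rfl
  · by_cases hn : name = "" <;>
      simp [hn, PySem.List.pyGet?_natCast, List.getElem?_eq_getElem hi]
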